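-- pv_equiv track=rewrite | github.com/jesvarzam/lookus | devicedetection/detection/utils.py | detectPorts
-- ===== SOURCE A (Python) =====
-- PRINTER_PORTS = [80, 443, 161, 631, 2501, 5001, 6310, 9100, 9101, 9102, 9600]
--
-- WEB_SERVER_PORTS = [22, 80, 443, 8080]
--
-- ROUTER_PORTS = [22, 53, 80, 443]
--
-- CAMERA_PORTS = [80, 443, 554]
--
-- def detectPorts(total_open_ports):
--
--     possible_devices = {'Página web personal': 0, 'Router': 0, 'Impresora': 0, 'Cámara': 0}
--
--     for port in total_open_ports:
--         if port in WEB_SERVER_PORTS: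
--             possible_devices['Página web personal'] += 1
--         if port in ROUTER_PORTS:
--             possible_devices['Router'] += 1
--         if port in PRINTER_PORTS:
--             possible_devices['Impresora'] += 1
--         if port in CAMERA_PORTS:
--             possible_devices['Cámara'] += 1
--
--     return possible_devices
-- ===== SOURCE B (Python) =====
-- PRINTER_PORTS = [80, 443, 161, 631, 2501, 5001, 6310, 9100, 9101, 9102, 9600]
--
-- WEB_SERVER_PORTS = [22, 80, 443, 8080]
--
-- ROUTER_PORTS = [22, 53, 80, 443]
--
-- CAMERA_PORTS = [80, 443, 554]
--
-- def detectPorts(total_open_ports):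
--     # Build a frequency table once, then sum the per-device port lists over it.
--     freq = {}
--     for port in total_open_ports:
--         freq[port] = freq.get(port, 0) + 1
--     return {
--         'Página web personal': sum(freq.get(p, 0) for p in WEB_SERVER_PORTS),
--         'Router': sum(freq.get(p, 0) for p in ROUTER_PORTS),
--         'Impresora': sum(freq.get(p, 0) for p in PRINTER_PORTS),
--         'Cámara': sum(freq.get(p, 0) for p in CAMERA_PORTS),
--     }
-- ===== Notes on version B (the rewrite author's own statement) =====
-- stated objective: idiomatic
-- what changed: B builds a frequency table of the open ports in one pass and then computes each device's tally by summing the table over that device's fixed port list, instead of A's per-port membership tests updating four counters.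
import Mathlib
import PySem

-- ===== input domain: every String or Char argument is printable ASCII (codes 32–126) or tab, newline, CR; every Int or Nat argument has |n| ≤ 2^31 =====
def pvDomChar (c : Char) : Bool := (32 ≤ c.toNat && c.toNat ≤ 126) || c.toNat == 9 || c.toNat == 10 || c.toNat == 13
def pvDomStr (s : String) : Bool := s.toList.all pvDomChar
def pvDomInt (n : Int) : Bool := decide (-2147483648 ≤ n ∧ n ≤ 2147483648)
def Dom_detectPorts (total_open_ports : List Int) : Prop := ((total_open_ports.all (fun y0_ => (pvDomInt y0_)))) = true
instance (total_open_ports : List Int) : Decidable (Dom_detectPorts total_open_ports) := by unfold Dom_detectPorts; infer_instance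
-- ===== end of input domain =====

-- B builds a frequency table in one pass and then sums each device's fixed port list over it,
-- instead of A's four membership tests per input port (objective: idiomatic histogram-then-index).

def PRINTER_PORTS : List Int := [80, 443, 161, 631, 2501, 5001, 6310, 9100, 9101, 9102, 9600]
def WEB_SERVER_PORTS : List Int := [22, 80, 443, 8080]
def ROUTER_PORTS : List Int := [22, 53, 80, 443]
def CAMERA_PORTS : List Int := [80, 443, 554]

-- ===== PORT A =====
-- loop body of A's for-loop (the four membership tests, in source order)
def stepA (d : PySem.Dict String Int) (port : Int) : PySem.Dict String Int :=
  let d := if port ∈ WEB_SERVER_PORTS then d.modify "Página web personal" 0 (· + 1) else d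
  let d := if port ∈ ROUTER_PORTS then d.modify "Router" 0 (· + 1) else d
  let d := if port ∈ PRINTER_PORTS then d.modify "Impresora" 0 (· + 1) else d
  let d := if port ∈ CAMERA_PORTS then d.modify "Cámara" 0 (· + 1) else d
  d

def detectPorts (total_open_ports : List Int) : List (String × Int) :=
  (total_open_ports.foldl stepA
    (PySem.Dict.ofList [("Página web personal", 0), ("Router", 0), ("Impresora", 0), ("Cámara", 0)])).items

-- ===== PORT B =====
def detectPorts_alt (total_open_ports : List Int) : List (String × Int) :=
  let freq : PySem.Dict Int Int :=
    total_open_ports.foldl (fun d port => d.insert port (d.getD port 0 + 1)) PySem.Dict.empty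
  [("Página web personal", WEB_SERVER_PORTS.foldl (fun s p => s + freq.getD p 0) 0),
   ("Router", ROUTER_PORTS.foldl (fun s p => s + freq.getD p 0) 0),
   ("Impresora", PRINTER_PORTS.foldl (fun s p => s + freq.getD p 0) 0),
   ("Cámara", CAMERA_PORTS.foldl (fun s p => s + freq.getD p 0) 0)]

-- ===== PRECONDITION & SPEC =====
def Spec_detectPorts (total_open_ports : List Int) (out : List (String × Int)) : Prop := out = detectPorts_alt total_open_ports
instance (total_open_ports : List Int) (out : List (String × Int)) : Decidable (Spec_detectPorts total_open_ports out) := by unfold Spec_detectPorts; infer_instance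

-- ===== CLAIM (what is proved, stated in full; the proofs are below) =====
def Claim_equal_detectPorts : Prop := ∀ (total_open_ports : List Int), Dom_detectPorts total_open_ports → Spec_detectPorts total_open_ports (detectPorts total_open_ports)

-- ===== LEMMAS AND PROOFS =====

/-- The loop state of A: the four-key dict with current tallies. -/
def D0 (a b c e : Int) : PySem.Dict String Int :=
  PySem.Dict.ofList [("Página web personal", a), ("Router", b), ("Impresora", c), ("Cámara", e)]

lemma D0_congr {a b c e a' b' c' e' : Int} (h1 : a = a') (h2 : b = b') (h3 : c = c')
    (h4 : e = e') : D0 a b c e = D0 a' b' c' e' := by subst h1 h2 h3 h4; rfl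

lemma modify_k1 (a b c e : Int) : (D0 a b c e).modify "Página web personal" 0 (· + 1) = D0 (a + 1) b c e := rfl
lemma modify_k2 (a b c e : Int) : (D0 a b c e).modify "Router" 0 (· + 1) = D0 a (b + 1) c e := rfl
lemma modify_k3 (a b c e : Int) : (D0 a b c e).modify "Impresora" 0 (· + 1) = D0 a b (c + 1) e := rfl
lemma modify_k4 (a b c e : Int) : (D0 a b c e).modify "Cámara" 0 (· + 1) = D0 a b c (e + 1) := rfl

lemma stepA_D0 (a b c e x : Int) :
    stepA (D0 a b c e) x
    = D0 (if x ∈ WEB_SERVER_PORTS then a + 1 else a) (if x ∈ ROUTER_PORTS then b + 1 else b)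
         (if x ∈ PRINTER_PORTS then c + 1 else c) (if x ∈ CAMERA_PORTS then e + 1 else e) := by
  unfold stepA
  split_ifs <;> simp only [modify_k1, modify_k2, modify_k3, modify_k4]

/-- Number of elements of `ps` lying in `L`, as an Int. -/
def cntIn (L ps : List Int) : Int := (ps.countP (fun x => decide (x ∈ L)) : Int)

lemma cntIn_nil (L : List Int) : cntIn L [] = 0 := rfl

lemma cntIn_cons (L : List Int) (x : Int) (ps : List Int) :
    cntIn L (x :: ps) = cntIn L ps + (if x ∈ L then 1 else 0) := by
  simp [cntIn, List.countP_cons]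

lemma foldA (ports : List Int) : ∀ a b c e : Int,
    ports.foldl stepA (D0 a b c e)
    = D0 (a + cntIn WEB_SERVER_PORTS ports) (b + cntIn ROUTER_PORTS ports)
         (c + cntIn PRINTER_PORTS ports) (e + cntIn CAMERA_PORTS ports) := by
  induction ports with
  | nil => intro a b c e; simp [cntIn_nil]
  | cons x ps ih =>
    intro a b c e
    rw [List.foldl_cons, stepA_D0, ih]
    apply D0_congr <;> rw [cntIn_cons] <;> split_ifs <;> ring

lemma items_D0 (a b c e : Int) :
    (D0 a b c e).items = [("Página web personal", a), ("Router", b), ("Impresora", c), ("Cámara", e)] := rfl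

lemma cnt_nil (ps : List Int) : ps.countP (fun x => decide (x ∈ ([] : List Int))) = 0 := by
  simp

lemma count_mem_split (p : Int) (L ps : List Int) (h : p ∉ L) :
    ps.countP (fun x => decide (x ∈ (p :: L)))
    = ps.count p + ps.countP (fun x => decide (x ∈ L)) := by
  induction ps with
  | nil => rfl
  | cons x l ih =>
    rw [List.countP_cons, List.countP_cons, List.count_cons, ih]
    by_cases h1 : x = p
    · subst h1
      have h2 : x ∉ L := h
      simp [h2]
      omega
    · by_cases h2 : x ∈ L
      · simp [List.mem_cons, h1, h2]
        omega
      · simp [List.mem_cons, h1, h2]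


lemma cntW (ps : List Int) : ps.countP (fun x => decide (x ∈ WEB_SERVER_PORTS))
    = ps.count 22 + ps.count 80 + ps.count 443 + ps.count 8080 := by
  unfold WEB_SERVER_PORTS
  rw [count_mem_split _ _ _ (by decide), count_mem_split _ _ _ (by decide),
    count_mem_split _ _ _ (by decide), count_mem_split _ _ _ (by decide), cnt_nil]
  omega

lemma cntR (ps : List Int) : ps.countP (fun x => decide (x ∈ ROUTER_PORTS))
    = ps.count 22 + ps.count 53 + ps.count 80 + ps.count 443 := by
  unfold ROUTER_PORTS
  rw [count_mem_split _ _ _ (by decide), count_mem_split _ _ _ (by decide),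
    count_mem_split _ _ _ (by decide), count_mem_split _ _ _ (by decide), cnt_nil]
  omega

lemma cntP (ps : List Int) : ps.countP (fun x => decide (x ∈ PRINTER_PORTS))
    = ps.count 80 + ps.count 443 + ps.count 161 + ps.count 631 + ps.count 2501 + ps.count 5001
      + ps.count 6310 + ps.count 9100 + ps.count 9101 + ps.count 9102 + ps.count 9600 := by
  unfold PRINTER_PORTS
  rw [count_mem_split _ _ _ (by decide), count_mem_split _ _ _ (by decide),
    count_mem_split _ _ _ (by decide), count_mem_split _ _ _ (by decide),
    count_mem_split _ _ _ (by decide), count_mem_split _ _ _ (by decide),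
    count_mem_split _ _ _ (by decide), count_mem_split _ _ _ (by decide),
    count_mem_split _ _ _ (by decide), count_mem_split _ _ _ (by decide),
    count_mem_split _ _ _ (by decide), cnt_nil]
  omega

lemma cntC (ps : List Int) : ps.countP (fun x => decide (x ∈ CAMERA_PORTS))
    = ps.count 80 + ps.count 443 + ps.count 554 := by
  unfold CAMERA_PORTS
  rw [count_mem_split _ _ _ (by decide), count_mem_split _ _ _ (by decide),
    count_mem_split _ _ _ (by decide), cnt_nil]
  omega

lemma freq_getD (ports : List Int) (p : Int) :
    (ports.foldl (fun d port => d.insert port (d.getD port 0 + 1)) PySem.Dict.empty).getD p 0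
    = (ports.count p : Int) := by
  rw [PySem.Dict.getD_foldl_insert_add_one]
  simp [PySem.Dict.getD_empty]

-- ===== VERDICT (by name: the statement is the Claim_ definition above) =====
theorem detectPorts_spec : Claim_equal_detectPorts := by
  intro ports _
  show detectPorts ports = detectPorts_alt ports
  unfold detectPorts detectPorts_alt
  rw [show (PySem.Dict.ofList [("Página web personal", (0:Int)), ("Router", 0), ("Impresora", 0), ("Cámara", 0)]) = D0 0 0 0 0 from rfl]
  rw [foldA, items_D0]
  simp only [cntIn, cntW, cntR, cntP, cntC]
  simp only [WEB_SERVER_PORTS, ROUTER_PORTS, PRINTER_PORTS, CAMERA_PORTS,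
    List.foldl_cons, List.foldl_nil, freq_getD]
  simp only [List.cons.injEq, Prod.mk.injEq, and_true, true_and]
  refine ⟨?_, ?_, ?_, ?_⟩ <;> push_cast <;> ring
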